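-- pv_equiv track=rewrite | github.com/n00-name/EGE-inf-2025 | rep/07.11.24/07_16.py | F
-- ===== SOURCE A (Python) =====
-- def F(n):
--     values = {i: 7 for i in range(7)}  # Initialize values for n < 7 as 7
--     for i in range(7, n + 1):
--         if i % 3 == 0:
--             values[i] = 3 + values[i - 1]
--         else:
--             values[i] = 5 - values[i - 1]
--     return values[n]
-- ===== SOURCE B (Python) =====
-- def F(n):
--     # Closed form: for n < 7 the value is the constant 7; from 7 on, the
--     # recurrence settles into a residue-class pattern mod 3.
--     if n < 7:
--         return 7
--     r = n % 3
--     if r == 0: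
--         return n + 1
--     if r == 1:
--         return 5 - n
--     return n - 1
-- ===== Notes on version B (the rewrite author's own statement) =====
-- stated objective: faster
-- what changed: Replaced the O(n) dictionary-building recurrence loop with an O(1) closed form: constant 7 below 7, then a value determined by n mod 3 (n+1, 5-n, or n-1).
-- outside the precondition, e.g. on F(-3): A raises KeyError, B returns 7
-- crash fix: A raises KeyError on n < 0 (values[n] with a key outside the dict); B returns 7, the same constant it returns for every n < 7. — e.g. on F(-3): A raises KeyError, B returns 7
import Mathlib
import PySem

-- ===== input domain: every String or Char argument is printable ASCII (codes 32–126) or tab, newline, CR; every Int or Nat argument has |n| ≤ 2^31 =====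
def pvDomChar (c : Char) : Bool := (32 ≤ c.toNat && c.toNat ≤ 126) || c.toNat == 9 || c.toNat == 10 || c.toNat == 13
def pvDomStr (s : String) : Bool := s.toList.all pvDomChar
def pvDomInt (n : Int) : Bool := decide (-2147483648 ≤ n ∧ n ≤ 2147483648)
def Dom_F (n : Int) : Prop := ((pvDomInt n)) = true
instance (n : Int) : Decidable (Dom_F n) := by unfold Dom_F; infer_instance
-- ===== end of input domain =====

-- B replaces A's O(n) dictionary-building loop by an O(1) closed form on n mod 3.

-- ===== PORT A =====
-- literal port of A: build {0..6: 7}, then the recurrence loop, then values[n].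
-- The dict is ported by hand as Std.HashMap Int Int: A only writes fresh integer keys and reads
-- existing ones, so insertion order never matters and the hash map is exact here (a PySem.Dict,
-- an association list, would make evaluation quadratic where the Python loop is linear).
-- values[n] raises KeyError for n < 0; Pre_F excludes those inputs, so getD's default is never used.
def F (n : Int) : Int :=
  let values : Std.HashMap Int Int :=
    (PySem.List.pyRange 0 7 1).foldl (fun d i => d.insert i 7) ∅
  let values :=
    (PySem.List.pyRange 7 (n + 1) 1).foldl
      (fun d i =>
        if PySem.Int.mod i 3 == 0 then d.insert i (3 + d.getD (i - 1) 0)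
        else d.insert i (5 - d.getD (i - 1) 0))
      values
  values.getD n 0

-- ===== PORT B =====
def F_alt (n : Int) : Int :=
  if n < 7 then 7
  else
    let r := PySem.Int.mod n 3
    if r == 0 then n + 1
    else if r == 1 then 5 - n
    else n - 1

-- ===== PRECONDITION & SPEC =====
-- Pre_F: A raises KeyError for n < 0 (values[n] with n outside the dict); no other input is excluded.
def Pre_F (n : Int) : Prop := 0 ≤ n
instance (n : Int) : Decidable (Pre_F n) := by unfold Pre_F; infer_instance
def pvWitness_F : Int := 10

-- A raises KeyError exactly on n < 0; B returns 7 there (the "n < 7" constant case).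
def Raises_F (n : Int) : Prop := n < 0
instance (n : Int) : Decidable (Raises_F n) := by unfold Raises_F; infer_instance
def pvRaiseWitness_F : Int := -3
def pvRaiseWitnessOut_F : Int := 7

def Spec_F (n : Int) (out : Int) : Prop := out = F_alt n
instance (n : Int) (out : Int) : Decidable (Spec_F n out) := by unfold Spec_F; infer_instance

-- ===== CLAIM (what is proved, stated in full; the proofs are below) =====
def Claim_equal_F : Prop := ∀ (n : Int), Dom_F n → Pre_F n → Spec_F n (F n)
def Claim_raises_F : Prop := (∀ (n : Int), Dom_F n → Raises_F n → ¬ Pre_F n) ∧ (Dom_F (pvRaiseWitness_F) ∧ Raises_F (pvRaiseWitness_F) ∧ F_alt (pvRaiseWitness_F) = pvRaiseWitnessOut_F)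

-- ===== LEMMAS AND PROOFS =====

-- the initial dict {i: 7 for i in range(7)}
def pvInit : Std.HashMap Int Int :=
  (PySem.List.pyRange 0 7 1).foldl (fun d i => d.insert i 7) ∅

-- A's loop body
def pvStep (d : Std.HashMap Int Int) (i : Int) : Std.HashMap Int Int :=
  if PySem.Int.mod i 3 == 0 then d.insert i (3 + d.getD (i - 1) 0)
  else d.insert i (5 - d.getD (i - 1) 0)

-- the dict after the loop has run up to m (inclusive)
def pvLoop (m : Int) : Std.HashMap Int Int :=
  (PySem.List.pyRange 7 (m + 1) 1).foldl pvStep pvInit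

lemma pvInit_getD (j : Int) (h0 : 0 ≤ j) (h6 : j ≤ 6) : pvInit.getD j 0 = 7 := by
  have hr : PySem.List.pyRange 0 7 1 = [0, 1, 2, 3, 4, 5, 6] := by decide
  unfold pvInit
  rw [hr]
  simp only [List.foldl]
  interval_cases j <;> simp [Std.HashMap.getD_insert]

-- the recurrence step matches the closed form
lemma pvStep_closed (m : Int) (hm : 6 ≤ m) :
    (if PySem.Int.mod (m + 1) 3 == 0 then 3 + F_alt m else 5 - F_alt m) = F_alt (m + 1) := by
  have h3 : (0:Int) < 3 := by norm_num
  unfold F_alt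
  simp only [PySem.Int.mod_eq_emod_of_pos h3, beq_iff_eq]
  split_ifs <;> omega

-- invariant: after the loop has run to m, every processed key holds the closed form
lemma pvLoop_getD (k : Nat) :
    ∀ j : Int, 0 ≤ j → j ≤ 6 + (k : Int) → (pvLoop (6 + (k : Int))).getD j 0 = F_alt j := by
  induction k with
  | zero =>
    intro j h0 h6
    have : pvLoop 6 = pvInit := by
      unfold pvLoop
      rw [PySem.List.pyRange_one_eq_nil (by norm_num)]
      rfl
    norm_num at h6 ⊢
    rw [this, pvInit_getD j h0 h6]
    unfold F_alt
    rw [if_pos (by omega)]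
  | succ k ih =>
    intro j h0 hj
    have hsplit : PySem.List.pyRange 7 (6 + ((k : Int) + 1) + 1) 1
        = PySem.List.pyRange 7 (6 + (k : Int) + 1) 1 ++ [6 + (k : Int) + 1] := by
      have : (6 + ((k : Int) + 1) + 1) = (6 + (k : Int) + 1) + 1 := by ring
      rw [this, PySem.List.pyRange_one_succ_right (by omega)]
    push_cast at hj ⊢
    have hloop : pvLoop (6 + ((k : Int) + 1)) = pvStep (pvLoop (6 + (k : Int))) (6 + (k : Int) + 1) := by
      unfold pvLoop
      have : (6 + ((k : Int) + 1) + 1) = (6 + (k : Int) + 1) + 1 := by ring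
      rw [this, PySem.List.pyRange_one_succ_right (by omega), List.foldl_append]
      rfl
    rw [hloop]
    by_cases hcase : j = 6 + (k : Int) + 1
    · subst hcase
      unfold pvStep
      have hprev : (pvLoop (6 + (k : Int))).getD (6 + (k : Int) + 1 - 1) 0 = F_alt (6 + (k : Int)) := by
        have : (6 + (k : Int) + 1 - 1) = 6 + (k : Int) := by ring
        rw [this]
        exact ih (6 + (k : Int)) (by omega) (le_refl _)
      split_ifs with h
      · rw [Std.HashMap.getD_insert_self, hprev]
        have := pvStep_closed (6 + (k : Int)) (by omega)
        rw [if_pos h] at this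
        exact this
      · rw [Std.HashMap.getD_insert_self, hprev]
        have := pvStep_closed (6 + (k : Int)) (by omega)
        rw [if_neg h] at this
        exact this
    · unfold pvStep
      split_ifs with h <;>
        · simp only [Std.HashMap.getD_insert, beq_iff_eq]
          rw [if_neg (fun hh => hcase hh.symm)]
          exact ih j h0 (by omega)

-- ===== VERDICT (by name: the statement is the Claim_ definition above) =====
theorem F_spec : Claim_equal_F := by
  intro n _ hpre
  unfold Spec_F F
  by_cases h7 : n < 7
  · -- loop is empty; values[n] comes from the initial dict
    show (((PySem.List.pyRange 7 (n + 1) 1).foldl pvStep pvInit).getD n 0) = F_alt n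
    rw [PySem.List.pyRange_one_eq_nil (by omega)]
    simp only [List.foldl_nil]
    rw [pvInit_getD n hpre (by omega)]
    unfold F_alt
    rw [if_pos h7]
  · -- n ≥ 7: the invariant at m = n
    show (((PySem.List.pyRange 7 (n + 1) 1).foldl pvStep pvInit).getD n 0) = F_alt n
    have hk : ∃ k : Nat, n = 6 + (k : Int) := ⟨(n - 6).toNat, by omega⟩
    obtain ⟨k, hkeq⟩ := hk
    have := pvLoop_getD k n hpre (by omega)
    unfold pvLoop at this
    rw [hkeq]
    rw [hkeq] at this
    exact this

@[simp] theorem F_raises : Claim_raises_F := by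
  unfold Claim_raises_F
  exact ⟨fun n _ hr hp => by unfold Raises_F at hr; unfold Pre_F at hp; omega, by decide⟩
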